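-- pv_equiv track=rewrite | github.com/davidvlaminck/RSA | lib/reports/DQReport.py | clean_query
-- ===== SOURCE A (Python) =====
-- def clean_query(query):
--     query_lines = query.split('\n')
--     new_q = []
--     for line in query_lines:
--         if '//' not in line:
--             new_q.append(line)
--         else:
--             new_q.append(line.split('//')[0])
--     return '\n'.join(new_q)
-- ===== SOURCE B (Python) =====
-- def clean_query(query):
--     # single pass over the characters: copy them, but once a comment starts
--     # skip everything up to (not including) the next newline
--     out = []
--     skip = False
--     n = len(query)
--     i = 0
--     while i < n:
--         c = query[i]
--         if c == '\n':
--             out.append(c)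
--             skip = False
--         elif not skip:
--             if c == '/' and i + 1 < n and query[i + 1] == '/':
--                 skip = True
--             else:
--                 out.append(c)
--         i += 1
--     return ''.join(out)
-- ===== Notes on version B (the rewrite author's own statement) =====
-- stated objective: alternative
-- what changed: Replaces split-into-lines / per-line split('//') / join with a single character-level scan that carries a 'inside comment' flag reset at newlines, never materialising a line list.
import Mathlib
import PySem

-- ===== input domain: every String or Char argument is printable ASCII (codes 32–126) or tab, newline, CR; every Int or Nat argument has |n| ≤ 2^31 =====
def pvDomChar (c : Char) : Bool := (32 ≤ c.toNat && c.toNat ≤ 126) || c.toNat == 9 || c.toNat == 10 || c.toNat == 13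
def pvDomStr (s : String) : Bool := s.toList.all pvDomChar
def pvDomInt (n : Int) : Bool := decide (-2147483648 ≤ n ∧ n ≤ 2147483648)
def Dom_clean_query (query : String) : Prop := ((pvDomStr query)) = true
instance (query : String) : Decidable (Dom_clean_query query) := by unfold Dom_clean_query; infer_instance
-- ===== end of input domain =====

-- B replaces the split-lines / per-line split('//') / join pipeline with a single
-- character scan carrying a comment-skipping flag (alternative decomposition, same O(n) cost).


-- ===== PORT A =====
-- literal port of A; split? returns some for the nonempty separators "\n" and "//",
-- so the `.getD []` defaults are never taken (they only totalize the port)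
def clean_query (query : String) : String :=
  let query_lines := (PySem.Str.split? query "\n").getD []
  let new_q := query_lines.foldl (fun acc line =>
    if PySem.Str.isIn "//" line = false then acc ++ [line]
    else acc ++ [PySem.List.pyGetD ((PySem.Str.split? line "//").getD []) 0 ""]) ([] : List String)
  PySem.Str.join "\n" new_q

-- ===== PORT B =====
-- the while-loop of Source B: one pass over the characters with the `skip` flag;
-- `rest.head? = some '/'` is the `i + 1 < n and query[i+1] == '/'` lookahead
def bScanB : List Char → Bool → List Char
  | [], _ => []
  | c :: rest, skip =>
    if c = '\n' then c :: bScanB rest false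
    else if skip then bScanB rest true
    else if c = '/' ∧ rest.head? = some '/' then bScanB rest true
    else c :: bScanB rest skip

def clean_query_alt (query : String) : String := String.ofList (bScanB query.toList false)

-- ===== PRECONDITION & SPEC =====
def Spec_clean_query (query : String) (out : String) : Prop := out = clean_query_alt query
instance (query : String) (out : String) : Decidable (Spec_clean_query query out) := by unfold Spec_clean_query; infer_instance

-- ===== CLAIM (what is proved, stated in full; the proofs are below) =====
def Claim_equal_clean_query : Prop := ∀ (query : String), Dom_clean_query query → Spec_clean_query query (clean_query query)

-- ===== LEMMAS AND PROOFS =====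

-- spec of splitting on '\n': first line and the remaining lines
def lsplit : List Char → List Char × List (List Char)
  | [] => ([], [])
  | c :: cs =>
    let p := lsplit cs
    if c = '\n' then ([], p.1 :: p.2) else (c :: p.1, p.2)

-- spec of `line.split('//')[0]`: the line up to the first '//'
def stripCmt : List Char → List Char
  | [] => []
  | c :: rest => if c = '/' ∧ rest.head? = some '/' then [] else c :: stripCmt rest

theorem go_zero (sep l cur : List Char) (acc : List (List Char)) :
    PySem.Chars.splitOn.go sep 0 l cur acc = ((cur.reverse ++ l) :: acc).reverse := by
  rw [PySem.Chars.splitOn.go.eq_def]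

theorem go_nil (sep : List Char) (n : Nat) (cur : List Char) (acc : List (List Char)) :
    PySem.Chars.splitOn.go sep (n + 1) [] cur acc = (cur.reverse :: acc).reverse := by
  rw [PySem.Chars.splitOn.go.eq_def]

theorem go_cons (sep : List Char) (n : Nat) (c : Char) (rest cur : List Char)
    (acc : List (List Char)) :
    PySem.Chars.splitOn.go sep (n + 1) (c :: rest) cur acc
      = if List.isPrefixOf sep (c :: rest)
        then PySem.Chars.splitOn.go sep n (List.drop sep.length (c :: rest)) [] (cur.reverse :: acc)
        else PySem.Chars.splitOn.go sep n rest (c :: cur) acc := by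
  rw [PySem.Chars.splitOn.go.eq_def]

theorem goN (fuel : Nat) : ∀ (l cur : List Char) (acc : List (List Char)), l.length ≤ fuel →
    PySem.Chars.splitOn.go ['\n'] fuel l cur acc
      = acc.reverse ++ (cur.reverse ++ (lsplit l).1) :: (lsplit l).2 := by
  induction fuel with
  | zero =>
    intro l cur acc h
    have hl : l = [] := List.eq_nil_of_length_eq_zero (Nat.le_zero.mp h)
    subst hl
    simp [go_zero, lsplit]
  | succ n ih =>
    intro l cur acc h
    cases l with
    | nil => simp [go_nil, lsplit]
    | cons c rest =>
      rw [go_cons]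
      by_cases hc : c = '\n'
      · subst hc
        rw [if_pos (by simp [List.isPrefixOf])]
        simp only [List.length_cons, List.length_nil, List.drop_succ_cons, List.drop_zero]
        rw [ih rest [] (cur.reverse :: acc) (by simp at h; omega)]
        simp [lsplit]
      · rw [if_neg (by simp [List.isPrefixOf]; exact fun hh => hc hh.symm)]
        rw [ih rest (c :: cur) acc (by simp at h; omega)]
        simp [lsplit, hc]

theorem splitN (cs : List Char) :
    PySem.Chars.splitOn cs ['\n'] = (lsplit cs).1 :: (lsplit cs).2 := by
  have := goN (cs.length + 1) cs [] [] (by omega)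
  simpa [PySem.Chars.splitOn] using this

theorem goS (fuel : Nat) : ∀ (l cur : List Char) (acc : List (List Char)), l.length ≤ fuel →
    ∃ t, PySem.Chars.splitOn.go ['/', '/'] fuel l cur acc
      = acc.reverse ++ (cur.reverse ++ stripCmt l) :: t := by
  induction fuel with
  | zero =>
    intro l cur acc h
    have hl : l = [] := List.eq_nil_of_length_eq_zero (Nat.le_zero.mp h)
    subst hl
    exact ⟨[], by simp [go_zero, stripCmt]⟩
  | succ n ih =>
    intro l cur acc h
    cases l with
    | nil => exact ⟨[], by simp [go_nil, stripCmt]⟩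
    | cons c rest =>
      rw [go_cons]
      by_cases hp : c = '/' ∧ rest.head? = some '/'
      · obtain ⟨hc, hr⟩ := hp
        subst hc
        cases rest with
        | nil => simp at hr
        | cons d r2 =>
          have hd : d = '/' := by simpa using hr
          subst hd
          rw [if_pos (by simp [List.isPrefixOf])]
          simp only [List.length_cons, List.length_nil, List.drop_succ_cons, List.drop_zero]
          obtain ⟨t', ht'⟩ := ih r2 [] (cur.reverse :: acc) (by simp at h; omega)
          refine ⟨stripCmt r2 :: t', ?_⟩
          rw [ht']
          simp [stripCmt]
      · rw [if_neg ?hpre]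
        case hpre =>
          cases rest with
          | nil => simp [List.isPrefixOf]
          | cons d r2 =>
            simp only [List.isPrefixOf, Bool.and_eq_true, beq_iff_eq]
            intro ⟨hc, hd, _⟩
            exact hp ⟨hc.symm, by simp [hd.symm]⟩
        obtain ⟨t, ht⟩ := ih rest (c :: cur) acc (by simp at h; omega)
        refine ⟨t, ?_⟩
        rw [ht]
        simp [stripCmt, hp]

theorem headSplitS (l : List Char) :
    (PySem.Chars.splitOn l ['/', '/']).headD [] = stripCmt l := by
  obtain ⟨t, ht⟩ := goS (l.length + 1) l [] [] (by omega)
  simp only [PySem.Chars.splitOn] at ht ⊢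
  rw [ht]
  simp

theorem stripCmt_of_not_infix (l : List Char) (h : ¬ ['/', '/'] <:+: l) :
    stripCmt l = l := by
  induction l with
  | nil => rfl
  | cons c rest ih =>
    rw [stripCmt]
    by_cases hp : c = '/' ∧ rest.head? = some '/'
    · exfalso
      obtain ⟨hc, hr⟩ := hp
      subst hc
      cases rest with
      | nil => simp at hr
      | cons d r2 =>
        have hd : d = '/' := by simpa using hr
        subst hd
        exact h ⟨[], r2, by simp⟩
    · rw [if_neg hp, ih (fun hi => h (hi.trans (List.suffix_cons c rest).isInfix))]

theorem joinN_cons (c : Char) (p : List Char) (rest : List (List Char)) :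
    PySem.Chars.join ['\n'] ((c :: p) :: rest) = c :: PySem.Chars.join ['\n'] (p :: rest) := by
  cases rest with
  | nil => simp [PySem.Chars.join_singleton]
  | cons q r => rw [PySem.Chars.join_cons_cons, PySem.Chars.join_cons_cons]; simp

theorem lsplit_head_slash (cs : List Char) :
    (lsplit cs).1.head? = some '/' ↔ cs.head? = some '/' := by
  cases cs with
  | nil => simp [lsplit]
  | cons c rest =>
    by_cases hc : c = '\n'
    · subst hc; simp [lsplit]
    · simp [lsplit, hc]

theorem main_scan (cs : List Char) :
    PySem.Chars.join ['\n'] (((lsplit cs).1 :: (lsplit cs).2).map stripCmt) = bScanB cs false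
    ∧ PySem.Chars.join ['\n'] (([] : List Char) :: ((lsplit cs).2).map stripCmt)
        = bScanB cs true := by
  induction cs with
  | nil => constructor <;> simp [lsplit, bScanB, stripCmt, PySem.Chars.join_singleton]
  | cons c rest ih =>
    obtain ⟨ihF, ihT⟩ := ih
    have hslash := lsplit_head_slash rest
    rcases hE : lsplit rest with ⟨h1, t1⟩
    rw [hE] at ihF ihT hslash
    simp only at ihF ihT hslash
    by_cases hc : c = '\n'
    · subst hc
      have hls : lsplit ('\n' :: rest) = ([], h1 :: t1) := by simp [lsplit, hE]
      have hbF : bScanB ('\n' :: rest) false = '\n' :: bScanB rest false := by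
        rw [bScanB, if_pos rfl]
      have hbT : bScanB ('\n' :: rest) true = '\n' :: bScanB rest false := by
        rw [bScanB, if_pos rfl]
      have hjoin : PySem.Chars.join ['\n']
            (([] : List Char) :: (h1 :: t1).map stripCmt) = '\n' :: bScanB rest false := by
        rw [List.map_cons, PySem.Chars.join_cons_cons]
        simp only [List.nil_append, List.singleton_append]
        rw [← List.map_cons, ihF]
      constructor
      · rw [hls, hbF]
        simp only [List.map_cons, show stripCmt [] = ([] : List Char) from rfl]
        simpa [List.map_cons] using hjoin
      · rw [hls, hbT]
        simpa using hjoin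
    · have hls : lsplit (c :: rest) = (c :: h1, t1) := by simp [lsplit, hE, hc]
      have hbT : bScanB (c :: rest) true = bScanB rest true := by
        rw [bScanB, if_neg hc, if_pos rfl]
      constructor
      · rw [hls]
        simp only [List.map_cons]
        by_cases hp : c = '/' ∧ rest.head? = some '/'
        · have hstrip : stripCmt (c :: h1) = [] := by
            rw [stripCmt, if_pos ⟨hp.1, hslash.mpr hp.2⟩]
          have hbF : bScanB (c :: rest) false = bScanB rest true := by
            rw [bScanB, if_neg hc, if_neg (by simp), if_pos hp]
          rw [hstrip, hbF]
          exact ihT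
        · have hhead : ¬ (c = '/' ∧ h1.head? = some '/') := by
            intro hx
            exact hp ⟨hx.1, hslash.mp hx.2⟩
          have hstrip : stripCmt (c :: h1) = c :: stripCmt h1 := by
            rw [stripCmt, if_neg hhead]
          have hbF : bScanB (c :: rest) false = c :: bScanB rest false := by
            rw [bScanB, if_neg hc, if_neg (by simp), if_neg hp]
          rw [hstrip, joinN_cons, hbF, ← List.map_cons, ihF]
      · rw [hls, hbT]
        exact ihT

theorem map_toList_splitA (s : String) :
    ((PySem.Str.split? s "\n").getD []).map String.toList
      = PySem.Chars.splitOn s.toList ['\n'] := by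
  have h := PySem.Str.split?_map s "\n"
  simp only [PySem.Chars.split?, show ("\n".toList.isEmpty = false) from rfl,
    Bool.false_eq_true, if_false] at h
  cases hs : PySem.Str.split? s "\n" with
  | none => rw [hs] at h; simp at h
  | some v =>
    rw [hs] at h
    simp only [Option.map_some, Option.some.injEq] at h
    simpa using h

theorem map_toList_splitB (line : String) :
    ((PySem.Str.split? line "//").getD []).map String.toList
      = PySem.Chars.splitOn line.toList ['/', '/'] := by
  have h := PySem.Str.split?_map line "//"
  simp only [PySem.Chars.split?, show ("//".toList.isEmpty = false) from rfl,
    Bool.false_eq_true, if_false] at h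
  cases hs : PySem.Str.split? line "//" with
  | none => rw [hs] at h; simp at h
  | some v =>
    rw [hs] at h
    simp only [Option.map_some, Option.some.injEq] at h
    simpa using h

-- the per-line transformation of A computes stripCmt of the line
theorem lineA_eq (line : String) :
    (if PySem.Str.isIn "//" line = false then line
     else PySem.List.pyGetD ((PySem.Str.split? line "//").getD []) 0 "").toList
      = stripCmt line.toList := by
  by_cases hin : PySem.Str.isIn "//" line = false
  · rw [if_pos hin]
    rw [PySem.Str.isIn_eq] at hin
    rw [stripCmt_of_not_infix _ ((PySem.Chars.isIn_eq_false_iff _ _).mp (by simpa using hin))]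
  · rw [if_neg hin]
    have hne : PySem.Chars.splitOn line.toList ['/', '/'] ≠ [] := by
      have := headSplitS line.toList
      intro hnil
      rw [hnil] at this
      cases hsp : PySem.Chars.splitOn line.toList ['/', '/'] with
      | nil =>
        have h0 := goS (line.toList.length + 1) line.toList [] [] (by omega)
        obtain ⟨t, ht⟩ := h0
        simp only [PySem.Chars.splitOn] at hsp
        rw [hsp] at ht
        simp at ht
      | cons a b => rw [hsp] at hnil; simp at hnil
    cases hm : ((PySem.Str.split? line "//").getD []) with
    | nil =>
      exfalso
      have := map_toList_splitB line
      rw [hm] at this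
      exact hne this.symm
    | cons a b =>
      have hmap := map_toList_splitB line
      rw [hm] at hmap
      rw [show PySem.List.pyGetD (a :: b) 0 "" = a by
        simp [PySem.List.pyGetD]]
      have := headSplitS line.toList
      rw [← hmap] at this
      simpa using this

-- A's foldl accumulates exactly the per-line map
theorem foldA (lines : List String) :
    lines.foldl (fun acc line =>
      if PySem.Str.isIn "//" line = false then acc ++ [line]
      else acc ++ [PySem.List.pyGetD ((PySem.Str.split? line "//").getD []) 0 ""])
      ([] : List String)
    = lines.map (fun line =>
        if PySem.Str.isIn "//" line = false then line
        else PySem.List.pyGetD ((PySem.Str.split? line "//").getD []) 0 "") := by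
  rw [show (fun (acc : List String) line =>
      if PySem.Str.isIn "//" line = false then acc ++ [line]
      else acc ++ [PySem.List.pyGetD ((PySem.Str.split? line "//").getD []) 0 ""])
    = (fun acc line => acc ++ [if PySem.Str.isIn "//" line = false then line
      else PySem.List.pyGetD ((PySem.Str.split? line "//").getD []) 0 ""]) from by
    funext acc line; split <;> rfl]
  simpa using PySem.List.foldl_append_singleton_eq_map _ _ ([] : List String)

-- ===== VERDICT (by name: the statement is the Claim_ definition above) =====
theorem clean_query_spec : Claim_equal_clean_query := by
  intro query _
  unfold Spec_clean_query
  rw [← String.toList_inj]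
  have hA : (clean_query query).toList
      = PySem.Chars.join ['\n']
          ((PySem.Chars.splitOn query.toList ['\n']).map stripCmt) := by
    simp only [clean_query]
    rw [foldA, PySem.Str.toList_join, List.map_map]
    rw [show (String.toList ∘ fun line =>
        if PySem.Str.isIn "//" line = false then line
        else PySem.List.pyGetD ((PySem.Str.split? line "//").getD []) 0 "")
      = (stripCmt ∘ String.toList) from funext fun line => lineA_eq line]
    rw [← List.map_map, map_toList_splitA]
    rfl
  rw [hA, clean_query_alt, String.toList_ofList, splitN]
  exact (main_scan query.toList).1
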